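-- pv_equiv track=rewrite | github.com/HussainAther/DFlow-Peptide-Membrane | src/hex_raft.py | generate_hex_spiral
-- ===== SOURCE A (Python) =====
-- def generate_hex_spiral(n):
--     coords = []
--     q = r = 0
--     directions = [(1, 0), (1, -1), (0, -1), (-1, 0), (-1, 1), (0, 1)]
--
--     ring = 0
--     while len(coords) < n:
--         if ring == 0:
--             coords.append((0, 0))
--             ring += 1
--             continue
--
--         q, r = -ring, 0
--         for d in directions:
--             for _ in range(ring):
--                 if len(coords) >= n:
--                     break
--                 coords.append((q, r))
--                 q += d[0]
--                 r += d[1]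
--         ring += 1
--     return coords
-- ===== SOURCE B (Python) =====
-- def generate_hex_spiral(n):
--     # Direction vectors and their prefix sums (segment-start offsets within a ring).
--     D = [(1, 0), (1, -1), (0, -1), (-1, 0), (-1, 1), (0, 1)]
--     S = [(0, 0), (1, 0), (2, -1), (2, -2), (1, -2), (0, -1)]
--     out = []
--     ring, start, cap = 0, 0, 1
--     for i in range(n):
--         if i - start >= cap:
--             start += cap
--             ring += 1
--             cap = 6 * ring
--         if ring == 0:
--             out.append((0, 0))
--             continue
--         seg, off = divmod(i - start, ring)
--         out.append((-ring + ring * S[seg][0] + off * D[seg][0],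
--                     ring * S[seg][1] + off * D[seg][1]))
--     return out
-- ===== Notes on version B (the rewrite author's own statement) =====
-- stated objective: alternative
-- what changed: Replaces the stateful nested ring/direction/step walk that mutates a running (q,r) with a single flat index loop that locates each index's ring and offset and computes the coordinate arithmetically from precomputed direction prefix sums.
import Mathlib
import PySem

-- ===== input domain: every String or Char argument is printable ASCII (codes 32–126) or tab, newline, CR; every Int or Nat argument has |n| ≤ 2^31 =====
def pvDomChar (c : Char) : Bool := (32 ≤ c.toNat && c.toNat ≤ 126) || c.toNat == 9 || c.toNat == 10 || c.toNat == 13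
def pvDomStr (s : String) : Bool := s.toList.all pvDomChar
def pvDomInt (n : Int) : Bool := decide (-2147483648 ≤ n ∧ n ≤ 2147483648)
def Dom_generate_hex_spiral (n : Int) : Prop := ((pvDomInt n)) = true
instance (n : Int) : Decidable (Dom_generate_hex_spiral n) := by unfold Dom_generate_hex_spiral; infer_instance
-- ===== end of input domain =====

-- B replaces A's stateful nested ring/direction/step walk by one flat loop over the
-- output indices that locates each index's ring and computes its coordinate
-- arithmetically from direction prefix sums (objective: alternative decomposition).

-- ===== PORT A =====

-- the 'directions' list (identical literal in A and B; defined once)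
def hexDirectionsA : List (Int × Int) := [(1, 0), (1, -1), (0, -1), (-1, 0), (-1, 1), (0, 1)]

-- inner 'for _ in range(ring)' with 'if len(coords) >= n: break'; state (coords, q, r)
def hexSegA (n : Int) (st : List (Int × Int) × Int × Int) (d : Int × Int) : Nat → List (Int × Int) × Int × Int
  | 0 => st
  | k + 1 =>
    if (st.1.length : Int) ≥ n then st
    else hexSegA n (st.1 ++ [(st.2.1, st.2.2)], st.2.1 + d.1, st.2.2 + d.2) d k

-- length lemmas the while-loop's termination needs
theorem hexSegA_len_ge (n : Int) (d : Int × Int) (k : Nat) :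
    ∀ st : List (Int × Int) × Int × Int, st.1.length ≤ (hexSegA n st d k).1.length := by
  induction k with
  | zero => intro st; simp [hexSegA]
  | succ k ih =>
    intro st
    simp only [hexSegA]
    split
    · exact le_refl _
    · exact le_trans (by simp) (ih _)

theorem hexFoldA_len_ge (n : Int) (k : Nat) :
    ∀ (ds : List (Int × Int)) (st : List (Int × Int) × Int × Int),
      st.1.length ≤ ((ds.foldl (fun st d => hexSegA n st d k) st).1).length := by
  intro ds
  induction ds with
  | nil => intro st; simp
  | cons d ds ih =>
    intro st
    exact le_trans (hexSegA_len_ge n d k st) (by simpa using ih (hexSegA n st d k))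

theorem hexSegA_len_gt (n : Int) (d : Int × Int) (k : Nat) (hk : 0 < k)
    (st : List (Int × Int) × Int × Int) (h : (st.1.length : Int) < n) :
    st.1.length < (hexSegA n st d k).1.length := by
  cases k with
  | zero => omega
  | succ k =>
    simp only [hexSegA]
    rw [if_neg (by omega)]
    calc st.1.length < (st.1 ++ [(st.2.1, st.2.2)]).length := by simp
      _ ≤ _ := by simpa using hexSegA_len_ge n d k (st.1 ++ [(st.2.1, st.2.2)], st.2.1 + d.1, st.2.2 + d.2)

theorem hexRingA_len_gt (n : Int) (k : Nat) (hk : 0 < k) (coords : List (Int × Int)) (q r : Int)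
    (h : (coords.length : Int) < n) :
    coords.length < ((hexDirectionsA.foldl (fun st d => hexSegA n st d k) (coords, q, r)).1).length := by
  have h1 : hexDirectionsA = (1, 0) :: [(1, -1), (0, -1), (-1, 0), (-1, 1), (0, 1)] := rfl
  rw [h1, List.foldl_cons]
  exact lt_of_lt_of_le (hexSegA_len_gt n (1, 0) k hk (coords, q, r) h) (hexFoldA_len_ge n k _ _)

-- the 'while len(coords) < n' loop; 'ring' only ever counts up from 0
def hexLoopA (n : Int) (coords : List (Int × Int)) (ring : Nat) : List (Int × Int) :=
  if h : (coords.length : Int) < n then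
    if hr : ring = 0 then hexLoopA n (coords ++ [((0 : Int), (0 : Int))]) 1
    else hexLoopA n ((hexDirectionsA.foldl (fun st d => hexSegA n st d ring) (coords, -(ring : Int), 0)).1) (ring + 1)
  else coords
termination_by (n - coords.length).toNat
decreasing_by
  · simp only [List.length_append, List.length_singleton]; omega
  · have := hexRingA_len_gt n ring (Nat.pos_of_ne_zero hr) coords (-(ring : Int)) 0 h
    omega

def generate_hex_spiral (n : Int) : List (Int × Int) := hexLoopA n [] 0

-- ===== PORT B =====

-- prefix sums of the direction vectors (B reuses the same literal direction list, defined once above)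
def hexPrefixB : List (Int × Int) := [(0, 0), (1, 0), (2, -1), (2, -2), (1, -2), (0, -1)]

-- S[seg] / D[seg]: seg = (i-start)//ring lies in [0,6) here, so Python never raises;
-- the .getD default is unreachable
def hexIdxB (l : List (Int × Int)) (j : Int) : Int × Int := (PySem.List.pyGet? l j).getD (0, 0)

-- one iteration of 'for i in range(n)'; state (out, ring, start, cap)
def hexStepB (st : List (Int × Int) × Int × Int × Int) (i : Int) : List (Int × Int) × Int × Int × Int :=
  let out := st.1
  let rsc := if i - st.2.2.1 ≥ st.2.2.2 then (st.2.1 + 1, st.2.2.1 + st.2.2.2, 6 * (st.2.1 + 1)) else st.2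
  if rsc.1 = 0 then (out ++ [((0 : Int), (0 : Int))], rsc)
  else
    let seg := PySem.Int.floordiv (i - rsc.2.1) rsc.1
    let off := PySem.Int.mod (i - rsc.2.1) rsc.1
    (out ++ [(-rsc.1 + rsc.1 * (hexIdxB hexPrefixB seg).1 + off * (hexIdxB hexDirectionsA seg).1,
              rsc.1 * (hexIdxB hexPrefixB seg).2 + off * (hexIdxB hexDirectionsA seg).2)], rsc)

def generate_hex_spiral_alt (n : Int) : List (Int × Int) :=
  ((PySem.List.pyRange 0 n 1).foldl hexStepB ([], 0, 0, 1)).1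

-- ===== PRECONDITION & SPEC =====
def Spec_generate_hex_spiral (n : Int) (out : List (Int × Int)) : Prop := out = generate_hex_spiral_alt n
instance (n : Int) (out : List (Int × Int)) : Decidable (Spec_generate_hex_spiral n out) := by unfold Spec_generate_hex_spiral; infer_instance

-- ===== CLAIM (what is proved, stated in full; the proofs are below) =====
def Claim_equal_generate_hex_spiral : Prop := ∀ (n : Int), Dom_generate_hex_spiral n → Spec_generate_hex_spiral n (generate_hex_spiral n)

-- ===== LEMMAS AND PROOFS =====

-- spec-side: direction / prefix-sum tables as functions
def hexDX : Nat → Int | 0 => 1 | 1 => 1 | 2 => 0 | 3 => -1 | 4 => -1 | _ => 0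
def hexDY : Nat → Int | 0 => 0 | 1 => -1 | 2 => -1 | 3 => 0 | 4 => 1 | _ => 1
def hexSX : Nat → Int | 0 => 0 | 1 => 1 | 2 => 2 | 3 => 2 | 4 => 1 | _ => 0
def hexSY : Nat → Int | 0 => 0 | 1 => 0 | 2 => -1 | 3 => -2 | 4 => -2 | _ => -1

-- coordinate of offset p within ring k
def posIn (k p : Nat) : Int × Int :=
  (-(k : Int) + k * hexSX (p / k) + ((p % k : Nat) : Int) * hexDX (p / k),
   (k : Int) * hexSY (p / k) + ((p % k : Nat) : Int) * hexDY (p / k))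

def ringFull (k : Nat) : List (Int × Int) := (List.range (6 * k)).map (posIn k)

-- locate rem among rings k+1, k+2, …: returns (ring, offset)
def locGo (rem k : Nat) : Nat × Nat :=
  if rem < 6 * (k + 1) then (k + 1, rem) else locGo (rem - 6 * (k + 1)) (k + 1)
termination_by rem
decreasing_by omega

def coordAt (i : Nat) : Int × Int :=
  if i = 0 then (0, 0) else posIn (locGo (i - 1) 0).1 (locGo (i - 1) 0).2

-- Σ_{j<m} 6*(a+j)
def sumFrom : Nat → Nat → Nat
  | _, 0 => 0
  | a, m + 1 => 6 * a + sumFrom (a + 1) m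

theorem sumFrom_succ_right (a m : Nat) : sumFrom a (m + 1) = sumFrom a m + 6 * (a + m) := by
  induction m generalizing a with
  | zero => simp [sumFrom]
  | succ m ih => rw [sumFrom, ih (a + 1), sumFrom]; ring_nf

theorem le_sumFrom (a m : Nat) : m ≤ sumFrom (a + 1) m := by
  induction m generalizing a with
  | zero => simp [sumFrom]
  | succ m ih => rw [sumFrom]; have := ih (a + 1); omega

theorem locGo_spec (m : Nat) : ∀ (a p : Nat), p < 6 * (a + 1 + m) →
    locGo (sumFrom (a + 1) m + p) a = (a + 1 + m, p) := by
  induction m with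
  | zero =>
    intro a p hp
    rw [sumFrom, locGo]
    simp only [Nat.zero_add]
    rw [if_pos (by omega)]
  | succ m ih =>
    intro a p hp
    rw [sumFrom, locGo, if_neg (by have := le_sumFrom (a + 1) m; omega)]
    have h1 : 6 * (a + 1) + sumFrom (a + 1 + 1) m + p - 6 * (a + 1) = sumFrom (a + 1 + 1) m + p := by omega
    rw [h1, ih (a + 1) p (by omega)]
    congr 1
    omega

-- the walk of one full segment
theorem walk_shift (q r : Int) (d : Int × Int) (m : Nat) :
    (q, r) :: (List.range m).map (fun t : Nat => (q + d.1 + t * d.1, r + d.2 + t * d.2)) =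
    (List.range (m + 1)).map (fun t : Nat => (q + t * d.1, r + t * d.2)) := by
  rw [List.range_succ_eq_map, List.map_cons, List.map_map]
  refine congrArg₂ _ (by simp) (List.map_congr_left ?_)
  intro t _
  simp only [Function.comp_apply, Prod.mk.injEq]
  refine ⟨by push_cast; ring, by push_cast; ring⟩

theorem hexSegA_stop (n : Int) (d : Int × Int) (k : Nat) (st : List (Int × Int) × Int × Int)
    (h : (st.1.length : Int) ≥ n) : hexSegA n st d k = st := by
  cases k <;> simp [hexSegA, h]

theorem hexSegA_untrunc (n : Int) (d : Int × Int) (k : Nat) :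
    ∀ (coords : List (Int × Int)) (q r : Int), (coords.length : Int) + k ≤ n →
    hexSegA n (coords, q, r) d k =
      (coords ++ (List.range k).map (fun t : Nat => (q + t * d.1, r + t * d.2)),
       q + k * d.1, r + k * d.2) := by
  induction k with
  | zero => intro coords q r _; simp [hexSegA]
  | succ k ih =>
    intro coords q r h
    rw [hexSegA, if_neg (by push_cast at h ⊢; omega)]
    rw [ih (coords ++ [(q, r)]) (q + d.1) (r + d.2) (by push_cast at h ⊢; simp; omega)]
    rw [List.append_assoc, List.singleton_append, walk_shift]
    simp only [Prod.mk.injEq]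
    refine ⟨by simp, by push_cast; ring, by push_cast; ring⟩

theorem hexSegA_trunc (n : Int) (d : Int × Int) (k : Nat) :
    ∀ (coords : List (Int × Int)) (q r : Int), (coords.length : Int) < n → n < (coords.length : Int) + k →
    ∃ q' r', hexSegA n (coords, q, r) d k =
      (coords ++ (List.range ((n - coords.length).toNat)).map (fun t : Nat => (q + t * d.1, r + t * d.2)),
       q', r') := by
  induction k with
  | zero =>
    intro coords q r h1 h2
    exact absurd h2 (by push_cast; omega)
  | succ k ih =>
    intro coords q r h1 h2
    rw [hexSegA, if_neg (by simp only []; omega)]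
    by_cases hlt : ((coords.length : Int)) + 1 < n
    · obtain ⟨q', r', he⟩ := ih (coords ++ [(q, r)]) (q + d.1) (r + d.2)
        (by simp only [List.length_append, List.length_singleton]; push_cast; omega)
        (by simp only [List.length_append, List.length_singleton]; push_cast at h2 ⊢; omega)
      refine ⟨q', r', ?_⟩
      rw [he]
      have hm : (n - ((coords ++ [(q, r)]).length : Int)).toNat + 1 = (n - (coords.length : Int)).toNat := by
        simp only [List.length_append, List.length_singleton]; push_cast; omega
      rw [List.append_assoc, List.singleton_append, walk_shift, hm]
    · refine ⟨q + d.1, r + d.2, ?_⟩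
      rw [hexSegA_stop n d k _ (by simp only [List.length_append, List.length_singleton]; push_cast; omega)]
      have hm : (n - (coords.length : Int)).toNat = 1 := by omega
      rw [hm]
      simp

-- the expected coordinates of a (possibly partial) list of segments walked from (q, r)
def fullWalk (k : Nat) : Int → Int → List (Int × Int) → List (Int × Int)
  | _, _, [] => []
  | q, r, d :: ds =>
    (List.range k).map (fun t : Nat => (q + t * d.1, r + t * d.2)) ++
      fullWalk k (q + k * d.1) (r + k * d.2) ds

theorem hexFoldA_stop (n : Int) (k : Nat) :
    ∀ (ds : List (Int × Int)) (st : List (Int × Int) × Int × Int), (st.1.length : Int) ≥ n →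
    ds.foldl (fun st d => hexSegA n st d k) st = st := by
  intro ds
  induction ds with
  | nil => intro st h; rfl
  | cons d ds ih => intro st h; rw [List.foldl_cons, hexSegA_stop n d k st h]; exact ih st h

theorem hexFoldA_walk (n : Int) (k : Nat) :
    ∀ (ds : List (Int × Int)) (coords : List (Int × Int)) (q r : Int),
    ((ds.foldl (fun st d => hexSegA n st d k) (coords, q, r)).1) =
      coords ++ (fullWalk k q r ds).take ((n - coords.length).toNat) := by
  intro ds
  induction ds with
  | nil => intro coords q r; simp [fullWalk]
  | cons d ds ih =>
    intro coords q r
    rw [List.foldl_cons]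
    have hlen : ((List.range k).map (fun t : Nat => (q + t * d.1, r + t * d.2))).length = k := by simp
    rcases lt_trichotomy ((coords.length : Int) + k) n with hun | heq | htr
    · -- the whole segment fits strictly below n
      rw [hexSegA_untrunc n d k coords q r (le_of_lt hun), ih]
      have e1 : List.take ((n - (coords.length : Int)).toNat) ((List.range k).map (fun t : Nat => (q + t * d.1, r + t * d.2))) = (List.range k).map (fun t : Nat => (q + t * d.1, r + t * d.2)) := List.take_of_length_le (by rw [hlen]; omega)
      have h2 : ((n - (coords.length : Int)).toNat - ((List.range k).map (fun t : Nat => (q + t * d.1, r + t * d.2))).length) = (n - (((coords ++ (List.range k).map (fun t : Nat => (q + t * d.1, r + t * d.2))).length : Nat) : Int)).toNat := by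
        simp only [List.length_append, hlen]; push_cast; omega
      rw [fullWalk, List.take_append, e1, h2, List.append_assoc]
    · -- the segment exactly reaches n
      rw [hexSegA_untrunc n d k coords q r (le_of_eq heq)]
      rw [hexFoldA_stop n k ds _ (by simp only [List.length_append, hlen]; push_cast; omega)]
      rw [fullWalk, List.take_append]
      rw [List.take_of_length_le (by rw [hlen]; omega)]
      have h0 : (n - (coords.length : Int)).toNat - ((List.range k).map (fun t : Nat => (q + t * d.1, r + t * d.2))).length = 0 := by
        rw [hlen]; omega
      rw [h0]
      simp
    · by_cases hge : (coords.length : Int) < n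
      · -- truncation happens inside this segment
        obtain ⟨q', r', he⟩ := hexSegA_trunc n d k coords q r hge htr
        rw [he, hexFoldA_stop n k ds _
          (by simp only [List.length_append, List.length_map, List.length_range]; push_cast; omega)]
        rw [fullWalk, List.take_append]
        have hk : (n - (coords.length : Int)).toNat ≤ k := by omega
        have h0 : (n - (coords.length : Int)).toNat - ((List.range k).map (fun t : Nat => (q + t * d.1, r + t * d.2))).length = 0 := by
          rw [hlen]; omega
        rw [h0, ← List.map_take, List.take_range, Nat.min_eq_left hk]
        simp
      · -- already full before this segment
        rw [hexSegA_stop n d k _ (by simp only []; omega),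
          hexFoldA_stop n k ds _ (by simp only []; omega)]
        have h0 : (n - (coords.length : Int)).toNat = 0 := by omega
        rw [h0]
        simp

theorem posIn_at (k j t : Nat) (hk : 0 < k) (ht : t < k) :
    posIn k (t + j * k) =
      (-(k : Int) + k * hexSX j + t * hexDX j, (k : Int) * hexSY j + t * hexDY j) := by
  unfold posIn
  rw [Nat.add_mul_div_right _ _ hk, Nat.div_eq_of_lt ht, Nat.add_mul_mod_self_right, Nat.mod_eq_of_lt ht,
    Nat.zero_add]

theorem fullWalk_ring (k : Nat) : fullWalk k (-(k : Int)) 0 hexDirectionsA = ringFull k := by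
  rcases Nat.eq_zero_or_pos k with hk | hk
  · subst hk; rfl
  · rw [ringFull, show 6 * k = k + (k + (k + (k + (k + k)))) by ring, List.range_eq_range']
    rw [← List.range'_append_1, ← List.range'_append_1, ← List.range'_append_1,
      ← List.range'_append_1, ← List.range'_append_1]
    simp only [List.map_append, List.range'_eq_map_range, List.map_map, hexDirectionsA, fullWalk,
      List.append_nil]
    refine congrArg₂ _ ?_ (congrArg₂ _ ?_ (congrArg₂ _ ?_ (congrArg₂ _ ?_ (congrArg₂ _ ?_ ?_))))
    · apply List.map_congr_left
      intro t ht
      rw [List.mem_range] at ht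
      simp only [Function.comp_apply]
      rw [show 0 + t = t + 0 * k by omega, posIn_at k 0 t hk ht]
      simp only [Prod.mk.injEq, show hexSX 0 = 0 from rfl, show hexSY 0 = 0 from rfl,
        show hexDX 0 = 1 from rfl, show hexDY 0 = 0 from rfl]
      constructor <;> first | trivial | omega
    · apply List.map_congr_left
      intro t ht
      rw [List.mem_range] at ht
      simp only [Function.comp_apply]
      rw [show 0 + k + t = t + 1 * k by omega, posIn_at k 1 t hk ht]
      simp only [Prod.mk.injEq, show hexSX 1 = 1 from rfl, show hexSY 1 = 0 from rfl,
        show hexDX 1 = 1 from rfl, show hexDY 1 = -1 from rfl]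
      constructor <;> trivial
    · apply List.map_congr_left
      intro t ht
      rw [List.mem_range] at ht
      simp only [Function.comp_apply]
      rw [show 0 + k + k + t = t + 2 * k by omega, posIn_at k 2 t hk ht]
      simp only [Prod.mk.injEq, show hexSX 2 = 2 from rfl, show hexSY 2 = -1 from rfl,
        show hexDX 2 = 0 from rfl, show hexDY 2 = -1 from rfl]
      constructor <;> first | trivial | omega
    · apply List.map_congr_left
      intro t ht
      rw [List.mem_range] at ht
      simp only [Function.comp_apply]
      rw [show 0 + k + k + k + t = t + 3 * k by omega, posIn_at k 3 t hk ht]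
      simp only [Prod.mk.injEq, show hexSX 3 = 2 from rfl, show hexSY 3 = -2 from rfl,
        show hexDX 3 = -1 from rfl, show hexDY 3 = 0 from rfl]
      constructor <;> first | trivial | omega
    · apply List.map_congr_left
      intro t ht
      rw [List.mem_range] at ht
      simp only [Function.comp_apply]
      rw [show 0 + k + k + k + k + t = t + 4 * k by omega, posIn_at k 4 t hk ht]
      simp only [Prod.mk.injEq, show hexSX 4 = 1 from rfl, show hexSY 4 = -2 from rfl,
        show hexDX 4 = -1 from rfl, show hexDY 4 = 1 from rfl]
      constructor <;> first | trivial | omega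
    · apply List.map_congr_left
      intro t ht
      rw [List.mem_range] at ht
      simp only [Function.comp_apply]
      rw [show 0 + k + k + k + k + k + t = t + 5 * k by omega, posIn_at k 5 t hk ht]
      simp only [Prod.mk.injEq, show hexSX 5 = 0 from rfl, show hexSY 5 = -1 from rfl,
        show hexDX 5 = 0 from rfl, show hexDY 5 = 1 from rfl]
      constructor <;> first | trivial | omega

-- A's whole while-loop, given enough remaining rings
theorem ringFull_length (k : Nat) : (ringFull k).length = 6 * k := by simp [ringFull]

theorem flatMapRing_cons (k m : Nat) :
    (List.range (m + 1)).flatMap (fun j => ringFull (k + j)) =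
      ringFull k ++ (List.range m).flatMap (fun j => ringFull (k + 1 + j)) := by
  rw [List.range_succ_eq_map, List.flatMap_cons, List.flatMap_map]
  refine congrArg₂ _ (by rw [Nat.add_zero]) ?_
  congr 1
  funext j
  congr 1
  omega

theorem hexLoopA_spec (n : Int) : ∀ (m : Nat), ∀ (k : Nat) (coords : List (Int × Int)), 1 ≤ k →
    n ≤ (coords.length : Int) + sumFrom k m →
    hexLoopA n coords k =
      coords ++ ((List.range m).flatMap (fun j => ringFull (k + j))).take ((n - coords.length).toNat) := by
  intro m
  induction m with
  | zero =>
    intro k coords hk hcap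
    rw [sumFrom] at hcap
    rw [hexLoopA, dif_neg (by omega)]
    have h0 : (n - (coords.length : Int)).toNat = 0 := by omega
    rw [h0]
    simp
  | succ m ih =>
    intro k coords hk hcap
    by_cases hlt : (coords.length : Int) < n
    · rw [hexLoopA, dif_pos hlt, dif_neg (by omega)]
      rw [hexFoldA_walk n k hexDirectionsA coords (-(k : Int)) 0, fullWalk_ring k]
      have hlen' : ((coords ++ (ringFull k).take ((n - (coords.length : Int)).toNat)).length : Int)
          = (coords.length : Int) + min ((n - (coords.length : Int)).toNat) (6 * k) := by
        simp only [List.length_append, List.length_take, ringFull_length]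
        push_cast
        omega
      rw [sumFrom] at hcap
      rw [ih (k + 1) _ (by omega) (by rw [hlen']; omega)]
      rw [flatMapRing_cons, List.take_append, List.append_assoc]
      refine congrArg _ (congrArg _ ?_)
      have h1 : (n - ((coords ++ (ringFull k).take ((n - (coords.length : Int)).toNat)).length : Int)).toNat
          = (n - (coords.length : Int)).toNat - (ringFull k).length := by
        rw [hlen', ringFull_length]
        omega
      rw [h1]
    · rw [hexLoopA, dif_neg hlt]
      have h0 : (n - (coords.length : Int)).toNat = 0 := by omega
      rw [h0]
      simp

theorem lenFlatMapRing (m : Nat) : ∀ a : Nat,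
    ((List.range m).flatMap (fun j => ringFull (a + j))).length = sumFrom a m := by
  induction m with
  | zero => intro a; simp [sumFrom]
  | succ m ih =>
    intro a
    rw [flatMapRing_cons, List.length_append, ringFull_length, ih (a + 1), sumFrom]

theorem flatMapRing_getElem (m : Nat) : ∀ (b rem : Nat), 1 ≤ b → ∀ (_ : rem < sumFrom b m)
    (h' : rem < ((List.range m).flatMap (fun j => ringFull (b + j))).length),
    ((List.range m).flatMap (fun j => ringFull (b + j)))[rem] =
      posIn (locGo rem (b - 1)).1 (locGo rem (b - 1)).2 := by
  induction m with
  | zero =>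
    intro b rem hb h h'
    rw [sumFrom] at h
    omega
  | succ m ih =>
    intro b rem hb h h'
    have hb1 : b - 1 + 1 = b := by omega
    rw [locGo, hb1]
    by_cases hin : rem < 6 * b
    · rw [if_pos hin]
      have hrem : rem < (ringFull b).length := by rw [ringFull_length]; omega
      rw [List.getElem_of_eq (flatMapRing_cons b m) h', List.getElem_append_left hrem]
      simp [ringFull]
    · rw [if_neg hin]
      have h6 : (ringFull b).length ≤ rem := by rw [ringFull_length]; omega
      rw [List.getElem_of_eq (flatMapRing_cons b m) h', List.getElem_append_right h6]
      simp only [ringFull_length]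
      rw [sumFrom] at h
      have := ih (b + 1) (rem - 6 * b) (by omega) (by omega) (by
        rw [lenFlatMapRing]; omega)
      simpa using this

-- A equals the index-wise spiral
theorem generate_hex_spiral_eq_map (n : Int) :
    generate_hex_spiral n = (List.range n.toNat).map coordAt := by
  unfold generate_hex_spiral
  by_cases hn : 0 < n
  · rw [hexLoopA, dif_pos (by simpa using hn), dif_pos rfl]
    rw [hexLoopA_spec n n.toNat 1 ([] ++ [((0 : Int), (0 : Int))]) (le_refl 1)
      (by have h1 : n.toNat ≤ sumFrom 1 n.toNat := by simpa using le_sumFrom 0 n.toNat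
          simp; omega)]
    simp only [List.nil_append]
    apply List.ext_getElem
    · simp only [List.length_append, List.length_cons, List.length_nil, List.length_take,
        lenFlatMapRing, List.length_map, List.length_range]
      have h1 : n.toNat ≤ sumFrom 1 n.toNat := by simpa using le_sumFrom 0 n.toNat
      omega
    · intro i h1 h2
      rw [List.getElem_map, List.getElem_range]
      match i with
      | 0 =>
        rw [List.getElem_append_left (by simp)]
        rfl
      | Nat.succ i =>
        rw [List.getElem_append_right (by simp)]
        simp only [List.length_cons, List.length_nil, Nat.zero_add, Nat.succ_sub_one]
        rw [List.getElem_take]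
        have hsum : i < sumFrom 1 n.toNat := by
          simp only [List.length_append, List.length_cons, List.length_nil, List.length_take,
            lenFlatMapRing] at h1
          omega
        rw [flatMapRing_getElem n.toNat 1 i (le_refl 1) hsum (by rw [lenFlatMapRing]; omega)]
        rw [coordAt, if_neg (by omega)]
        rfl
  · rw [hexLoopA, dif_neg (by simpa using hn)]
    have h0 : n.toNat = 0 := by omega
    rw [h0]
    rfl

-- B-side invariant on (ring, start, cap) entering iteration i
def InvB (i : Nat) (ring start cap : Int) : Prop :=
  (ring = 0 ∧ start = 0 ∧ cap = 1 ∧ i ≤ 1) ∨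
  (∃ k : Nat, 1 ≤ k ∧ ring = (k : Int) ∧ cap = 6 * (k : Int) ∧
    start = 1 + (sumFrom 1 (k - 1) : Int) ∧ start ≤ (i : Int) ∧ (i : Int) ≤ start + cap)

theorem hexIdxB_tables (j : Nat) (hj : j < 6) :
    hexIdxB hexPrefixB (j : Int) = (hexSX j, hexSY j) ∧
    hexIdxB hexDirectionsA (j : Int) = (hexDX j, hexDY j) := by
  interval_cases j <;> exact ⟨rfl, rfl⟩

theorem locGo_loc (k p : Nat) (hk : 1 ≤ k) (hp : p < 6 * k) :
    locGo (sumFrom 1 (k - 1) + p) 0 = (k, p) := by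
  have h := locGo_spec (k - 1) 0 p (by omega)
  have h1 : (0 : Nat) + 1 + (k - 1) = k := by omega
  rw [h1] at h
  simpa using h

theorem coordAt_loc (k p i : Nat) (hk : 1 ≤ k) (hp : p < 6 * k)
    (hi : i = 1 + sumFrom 1 (k - 1) + p) : coordAt i = posIn k p := by
  subst hi
  rw [coordAt, if_neg (by omega)]
  have h1 : 1 + sumFrom 1 (k - 1) + p - 1 = sumFrom 1 (k - 1) + p := by omega
  rw [h1, locGo_loc k p hk hp]

theorem bval (k p : Nat) (hk : 1 ≤ k) (hp : p < 6 * k) :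
    ((-(k : Int) + (k : Int) * (hexIdxB hexPrefixB (PySem.Int.floordiv (p : Int) (k : Int))).1 +
        PySem.Int.mod (p : Int) (k : Int) * (hexIdxB hexDirectionsA (PySem.Int.floordiv (p : Int) (k : Int))).1,
      (k : Int) * (hexIdxB hexPrefixB (PySem.Int.floordiv (p : Int) (k : Int))).2 +
        PySem.Int.mod (p : Int) (k : Int) * (hexIdxB hexDirectionsA (PySem.Int.floordiv (p : Int) (k : Int))).2))
      = posIn k p := by
  rw [PySem.Int.floordiv_natCast, PySem.Int.mod_natCast]
  have hdiv : p / k < 6 := by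
    rw [Nat.div_lt_iff_lt_mul (by omega)]
    omega
  obtain ⟨h1, h2⟩ := hexIdxB_tables (p / k) hdiv
  rw [h1, h2]
  rfl

theorem hexStepB_spec (i : Nat) (out : List (Int × Int)) (ring start cap : Int)
    (h : InvB i ring start cap) :
    ∃ ring' start' cap', hexStepB (out, ring, start, cap) (i : Int) =
      (out ++ [coordAt i], ring', start', cap') ∧ InvB (i + 1) ring' start' cap' := by
  rcases h with ⟨h0, hs, hc, hi⟩ | ⟨k, hk, hring, hcap, hstart, hlo, hhi⟩
  · subst h0 hs hc
    interval_cases i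
    · refine ⟨0, 0, 1, ?_, Or.inl ⟨rfl, rfl, rfl, by omega⟩⟩
      simp [hexStepB, coordAt]
    · have hc1 : coordAt 1 = (-1, 0) := coordAt_loc 1 0 1 (le_refl 1) (by omega) (by simp [sumFrom])
      refine ⟨1, 1, 6, ?_, Or.inr ⟨1, le_refl 1, rfl, by norm_num, by simp [sumFrom], by omega, by omega⟩⟩
      rw [hc1]
      simp only [hexStepB]
      rfl
  · subst hring hcap hstart
    by_cases hadv : (i : Int) < 1 + (sumFrom 1 (k - 1) : Int) + 6 * k
    · -- index i still lies in ring k: no advance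
      have hple : 1 + sumFrom 1 (k - 1) ≤ i := by omega
      have hp6 : i - (1 + sumFrom 1 (k - 1)) < 6 * k := by omega
      have harg : (i : Int) - (1 + (sumFrom 1 (k - 1) : Int)) = ((i - (1 + sumFrom 1 (k - 1)) : Nat) : Int) := by
        omega
      refine ⟨k, 1 + (sumFrom 1 (k - 1) : Int), 6 * k, ?_,
        Or.inr ⟨k, hk, rfl, rfl, rfl, by omega, by omega⟩⟩
      have hcond : ¬((i : Int) - (1 + (sumFrom 1 (k - 1) : Int)) ≥ 6 * (k : Int)) := by omega
      have hk0 : ¬((k : Int) = 0) := by omega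
      simp only [hexStepB, if_neg hcond, if_neg hk0]
      rw [harg, bval k _ hk hp6, coordAt_loc k (i - (1 + sumFrom 1 (k - 1))) i hk hp6 (by omega)]
    · -- i = start + cap: advance to ring k+1, offset 0
      have hieq : (i : Nat) = 1 + sumFrom 1 (k - 1) + 6 * k := by omega
      have hsum1 : sumFrom 1 (k + 1 - 1) = sumFrom 1 (k - 1) + 6 * k := by
        have h2 : k - 1 + 1 = k := by omega
        have h3 := sumFrom_succ_right 1 (k - 1)
        rw [h2] at h3
        rw [show k + 1 - 1 = k from by omega, h3]
        omega
      have harg : (i : Int) - (1 + (sumFrom 1 (k - 1) : Int) + 6 * k) = (0 : Int) := by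
        omega
      refine ⟨(k : Int) + 1, 1 + (sumFrom 1 (k - 1) : Int) + 6 * k, 6 * ((k : Int) + 1), ?_,
        Or.inr ⟨k + 1, by omega, by push_cast; ring, by push_cast; ring, by have h4 := hsum1; push_cast at h4 ⊢; omega, by omega, by omega⟩⟩
      have hcond : ((i : Int) - (1 + (sumFrom 1 (k - 1) : Int)) ≥ 6 * (k : Int)) := by omega
      have hk0 : ¬((k : Int) + 1 = 0) := by omega
      simp only [hexStepB, if_pos hcond, if_neg hk0]
      rw [harg]
      have hb := bval (k + 1) 0 (by omega) (by omega)
      push_cast at hb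
      rw [hb, coordAt_loc (k + 1) 0 i (by omega) (by omega) (by omega)]

theorem hexFoldB_spec (m : Nat) : ∀ (i : Nat) (out : List (Int × Int)) (ring start cap : Int),
    InvB i ring start cap →
    (((List.range' i m).foldl (fun st (j : Nat) => hexStepB st (j : Int)) (out, ring, start, cap)).1) =
      out ++ (List.range' i m).map coordAt := by
  induction m with
  | zero => intro i out ring start cap _; simp
  | succ m ih =>
    intro i out ring start cap hInv
    obtain ⟨ring', start', cap', hstep, hInv'⟩ := hexStepB_spec i out ring start cap hInv
    rw [List.range'_succ, List.foldl_cons, hstep, List.map_cons, ih (i + 1) _ _ _ _ hInv']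
    simp

theorem generate_hex_spiral_alt_eq_map (n : Int) :
    generate_hex_spiral_alt n = (List.range n.toNat).map coordAt := by
  unfold generate_hex_spiral_alt
  rw [PySem.List.pyRange_one, show n - 0 = n from by ring, List.foldl_map]
  simp only [zero_add]
  rw [List.range_eq_range']
  rw [hexFoldB_spec n.toNat 0 [] 0 0 1 (Or.inl ⟨rfl, rfl, rfl, by omega⟩)]
  simp

-- ===== VERDICT (by name: the statement is the Claim_ definition above) =====
theorem generate_hex_spiral_spec : Claim_equal_generate_hex_spiral := by
  intro n _
  unfold Spec_generate_hex_spiral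
  rw [generate_hex_spiral_eq_map, generate_hex_spiral_alt_eq_map]
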